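-- pv_equiv track=rewrite | github.com/teocaserta/analisi-professionisti | excel_parser.py | _map_cols
-- ===== SOURCE A (Python) =====
-- def _map_cols(headers: list[str], mapping: dict[str, list[str]]) -> dict[str, int | None]:
--     result = {}
--     for key, aliases in mapping.items():
--         result[key] = None
--         for i, h in enumerate(headers):
--             if any(alias in h for alias in aliases):
--                 result[key] = i
--                 break
--     return result
-- ===== SOURCE B (Python) =====
-- def _map_cols(headers: list[str], mapping: dict[str, list[str]]) -> dict[str, int | None]:
--     result = {key: None for key in mapping}
--     pending = list(mapping.items())
--     for i, h in enumerate(headers):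
--         if not pending:
--             break
--         still = []
--         for key, aliases in pending:
--             if any(alias in h for alias in aliases):
--                 result[key] = i
--             else:
--                 still.append((key, aliases))
--         pending = still
--     return result
-- ===== Notes on version B (the rewrite author's own statement) =====
-- stated objective: alternative
-- what changed: B inverts the loop nesting: instead of A's per-key rescan of all headers, B pre-fills every key with None and makes one outer pass over the headers, assigning each still-pending key at its first matching header and stopping early once no key is pending.
import Mathlib
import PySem

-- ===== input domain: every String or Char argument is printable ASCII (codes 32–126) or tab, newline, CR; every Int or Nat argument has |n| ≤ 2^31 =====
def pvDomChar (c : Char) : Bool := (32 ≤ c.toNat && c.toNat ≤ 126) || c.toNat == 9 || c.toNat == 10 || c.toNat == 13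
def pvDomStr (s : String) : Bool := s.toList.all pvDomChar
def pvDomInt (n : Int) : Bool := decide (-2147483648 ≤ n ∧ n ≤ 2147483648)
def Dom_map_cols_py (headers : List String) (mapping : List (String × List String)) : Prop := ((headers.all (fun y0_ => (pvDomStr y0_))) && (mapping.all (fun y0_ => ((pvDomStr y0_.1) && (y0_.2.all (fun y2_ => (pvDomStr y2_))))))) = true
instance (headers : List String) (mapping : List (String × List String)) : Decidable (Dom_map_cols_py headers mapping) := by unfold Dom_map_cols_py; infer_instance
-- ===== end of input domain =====

-- Program B re-decomposes A's key-outer nested scan into a single header-outer pass over a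
-- shrinking pending list with early exit; same results, same asymptotic cost (objective: alternative).


-- ===== PORT A =====
-- inner 'for i, h in enumerate(headers): … break' of A
def mapColsInner (key : String) (aliases : List String) :
    List (Int × String) → PySem.Dict String (Option Int) → PySem.Dict String (Option Int)
  | [], result => result
  | (i, h) :: rest, result =>
      if aliases.any (fun al => PySem.Str.isIn al h) then result.insert key (some i)
      else mapColsInner key aliases rest result

def map_cols_py (headers : List String) (mapping : List (String × List String)) : List (String × Option Int) :=
  (mapping.foldl
    (fun (result : PySem.Dict String (Option Int)) kv =>
      mapColsInner kv.1 kv.2 (PySem.List.enumerate headers 0) (result.insert kv.1 none))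
    PySem.Dict.empty).items

-- ===== PORT B =====
-- one header step of B: scan pending, assign matches, keep the rest
def mapColsStep (i : Int) (h : String) (pending : List (String × List String))
    (result : PySem.Dict String (Option Int)) :
    PySem.Dict String (Option Int) × List (String × List String) :=
  pending.foldl
    (fun (acc : PySem.Dict String (Option Int) × List (String × List String)) kv =>
      if kv.2.any (fun al => PySem.Str.isIn al h) then (acc.1.insert kv.1 (some i), acc.2)
      else (acc.1, acc.2 ++ [kv]))
    (result, [])

-- header-outer loop of B with early exit when pending is empty
def mapColsScan : List (Int × String) → List (String × List String) →
    PySem.Dict String (Option Int) → PySem.Dict String (Option Int)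
  | _, [], result => result
  | [], _, result => result
  | (i, h) :: rest, pending, result =>
      let st := mapColsStep i h pending result
      mapColsScan rest st.2 st.1

def map_cols_py_alt (headers : List String) (mapping : List (String × List String)) : List (String × Option Int) :=
  let result0 := mapping.foldl
    (fun (d : PySem.Dict String (Option Int)) kv => d.insert kv.1 none) PySem.Dict.empty
  (mapColsScan (PySem.List.enumerate headers 0) mapping result0).items

-- ===== PRECONDITION & SPEC =====
-- Pre_ requires the mapping keys to be pairwise distinct: the Python argument is a dict, whose
-- keys are distinct by construction, so no Python input is excluded.
def Pre_map_cols_py (headers : List String) (mapping : List (String × List String)) : Prop :=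
  (mapping.map Prod.fst).Nodup
instance (headers : List String) (mapping : List (String × List String)) : Decidable (Pre_map_cols_py headers mapping) := by unfold Pre_map_cols_py; infer_instance

def pvWitness_map_cols_py : List String × (List (String × List String)) :=
  (["id col", "name"], [("id", ["id"]), ("nome", ["name", "nominativo"]), ("x", [])])

def Spec_map_cols_py (headers : List String) (mapping : List (String × List String)) (out : List (String × Option Int)) : Prop := out = map_cols_py_alt headers mapping
instance (headers : List String) (mapping : List (String × List String)) (out : List (String × Option Int)) : Decidable (Spec_map_cols_py headers mapping out) := by unfold Spec_map_cols_py; infer_instance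

-- ===== CLAIM (what is proved, stated in full; the proofs are below) =====
def Claim_equal_map_cols_py : Prop := ∀ (headers : List String) (mapping : List (String × List String)), Dom_map_cols_py headers mapping → Pre_map_cols_py headers mapping → Spec_map_cols_py headers mapping (map_cols_py headers mapping)

-- ===== LEMMAS AND PROOFS =====

-- first index in the (index, header) list matched by `aliases`, default `v`
def firstHit (aliases : List String) : List (Int × String) → Option Int → Option Int
  | [], v => v
  | (i, h) :: rest, v =>
      if aliases.any (fun al => PySem.Str.isIn al h) then some i else firstHit aliases rest v

theorem mapColsInner_eq (key : String) (aliases : List String) :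
    ∀ (l : List (Int × String)) (d : PySem.Dict String (Option Int)) (v : Option Int),
    mapColsInner key aliases l (d.insert key v) = d.insert key (firstHit aliases l v) := by
  intro l
  induction l with
  | nil => intro d v; rfl
  | cons p rest ih =>
      intro d v
      obtain ⟨i, h⟩ := p
      by_cases hm : aliases.any (fun al => PySem.Str.isIn al h) = true
      · simp only [mapColsInner, firstHit, hm]
        simp [PySem.Dict.insert_insert_self]
      · rw [Bool.not_eq_true] at hm
        simp only [mapColsInner, firstHit, hm]
        simp [ih]

theorem map_cols_py_items (headers : List String) (mapping : List (String × List String))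
    (hnd : (mapping.map Prod.fst).Nodup) :
    map_cols_py headers mapping =
      mapping.map (fun kv => (kv.1, firstHit kv.2 (PySem.List.enumerate headers 0) none)) := by
  unfold map_cols_py
  have hfold : (mapping.foldl
      (fun (result : PySem.Dict String (Option Int)) kv =>
        mapColsInner kv.1 kv.2 (PySem.List.enumerate headers 0) (result.insert kv.1 none))
      PySem.Dict.empty) =
      (mapping.foldl
        (fun (result : PySem.Dict String (Option Int)) kv =>
          result.insert kv.1 (firstHit kv.2 (PySem.List.enumerate headers 0) none))
        PySem.Dict.empty) := by
    congr 1
    funext d kv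
    exact mapColsInner_eq kv.1 kv.2 (PySem.List.enumerate headers 0) d none
  rw [hfold]
  rw [PySem.Dict.items_foldl_insert_fresh]
  · rw [show (PySem.Dict.empty : PySem.Dict String (Option Int)).items = [] from rfl, List.nil_append]
  · intro a _; simp
  · simpa using hnd

-- `find?` by key in a nodup-key association list finds the member itself
theorem find?_key_of_nodup {β : Type} :
    ∀ (P : List (String × β)) (kv : String × β), (P.map Prod.fst).Nodup → kv ∈ P →
    P.find? (fun q => q.1 == kv.1) = some kv := by
  intro P
  induction P with
  | nil => intro kv _ hm; cases hm
  | cons q rest ih =>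
      intro kv hnd hm
      simp only [List.map_cons, List.nodup_cons] at hnd
      rcases List.mem_cons.mp hm with h | h
      · subst h; rw [List.find?_cons_of_pos (by simp)]
      · have hne : ¬ (q.1 == kv.1) = true := by
          simp only [beq_iff_eq]
          intro he
          exact hnd.1 (he ▸ List.mem_map.mpr ⟨kv, h, rfl⟩)
        rw [List.find?_cons_of_neg (by simpa using hne)]
        exact ih kv hnd.2 h

-- the post-processing B applies, as a function of pending and remaining headers
def pendingVal (P : List (String × List String)) (l : List (Int × String)) (p : String × Option Int) :
    String × Option Int :=
  match P.find? (fun kv => kv.1 == p.1) with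
  | some kv => (p.1, firstHit kv.2 l p.2)
  | none => p

theorem mapColsStep_snd (i : Int) (h : String) :
    ∀ (P : List (String × List String)) (d : PySem.Dict String (Option Int))
      (acc : List (String × List String)),
    (P.foldl
      (fun (acc : PySem.Dict String (Option Int) × List (String × List String)) kv =>
        if kv.2.any (fun al => PySem.Str.isIn al h) then (acc.1.insert kv.1 (some i), acc.2)
        else (acc.1, acc.2 ++ [kv])) (d, acc)).2 =
      acc ++ P.filter (fun kv => !(kv.2.any (fun al => PySem.Str.isIn al h))) := by
  intro P
  induction P with
  | nil => intro d acc; simp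
  | cons kv rest ih =>
      intro d acc
      by_cases hm : kv.2.any (fun al => PySem.Str.isIn al h) = true
      · rw [List.foldl_cons, if_pos hm, ih, List.filter_cons_of_neg (by simpa using hm)]
      · rw [List.foldl_cons, if_neg hm, ih, List.filter_cons_of_pos (by simpa using hm)]
        simp

theorem mapColsStep_fst (i : Int) (h : String) :
    ∀ (P : List (String × List String)) (d : PySem.Dict String (Option Int))
      (acc : List (String × List String)),
    (∀ kv ∈ P, d.contains kv.1 = true) →
    (P.foldl
      (fun (acc : PySem.Dict String (Option Int) × List (String × List String)) kv =>
        if kv.2.any (fun al => PySem.Str.isIn al h) then (acc.1.insert kv.1 (some i), acc.2)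
        else (acc.1, acc.2 ++ [kv])) (d, acc)).1.items =
      d.items.map (fun p =>
        if P.any (fun kv => kv.1 == p.1 && kv.2.any (fun al => PySem.Str.isIn al h))
        then (p.1, some i) else p) := by
  intro P
  induction P with
  | nil => intro d acc _; simp
  | cons kv rest ih =>
      intro d acc hc
      by_cases hm : kv.2.any (fun al => PySem.Str.isIn al h) = true
      · rw [List.foldl_cons, if_pos hm]
        rw [ih (d.insert kv.1 (some i)) acc]
        · rw [PySem.Dict.items_insert_of_contains _ _ (hc kv (List.mem_cons_self))]
          rw [List.map_map]
          apply List.map_congr_left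
          intro p _
          simp only [Function.comp]
          by_cases hk : (p.1 == kv.1) = true
          · have hk' : p.1 = kv.1 := by simpa using hk
            have hhead : ((kv :: rest).any fun q => q.1 == p.1 && q.2.any fun al => PySem.Str.isIn al h) = true := by
              rw [List.any_cons]
              have h1 : (kv.1 == p.1) = true := by simp [hk']
              rw [h1, hm]
              rfl
            rw [if_pos hk]
            dsimp only
            rw [if_pos hhead, ite_self, hk']
          · have hk' : p.1 ≠ kv.1 := by simpa using hk
            have hne : (kv.1 == p.1) = false := by
              rw [beq_eq_false_iff_ne]; exact Ne.symm hk'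
            have hcond : ((kv :: rest).any fun q => q.1 == p.1 && q.2.any fun al => PySem.Str.isIn al h)
                = (rest.any fun q => q.1 == p.1 && q.2.any fun al => PySem.Str.isIn al h) := by
              rw [List.any_cons, hne]
              simp
            rw [if_neg hk]
            rw [hcond]
        · intro q hq
          rw [PySem.Dict.contains_insert]
          simp [hc q (List.mem_cons_of_mem _ hq)]
      · rw [List.foldl_cons, if_neg hm]
        rw [ih d (acc ++ [kv]) (fun q hq => hc q (List.mem_cons_of_mem _ hq))]
        rw [Bool.not_eq_true] at hm
        apply List.map_congr_left
        intro p _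
        have hcond : ((kv :: rest).any fun q => q.1 == p.1 && q.2.any fun al => PySem.Str.isIn al h)
            = (rest.any fun q => q.1 == p.1 && q.2.any fun al => PySem.Str.isIn al h) := by
          rw [List.any_cons, hm]
          simp
        rw [hcond]

theorem keys_mapColsStep (i : Int) (h : String) (P : List (String × List String))
    (d : PySem.Dict String (Option Int)) (hc : ∀ kv ∈ P, d.contains kv.1 = true) :
    (mapColsStep i h P d).1.keys = d.keys := by
  have := mapColsStep_fst i h P d [] hc
  unfold mapColsStep
  simp only [PySem.Dict.keys] at *
  rw [this, List.map_map]
  apply List.map_congr_left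
  intro p _
  simp only [Function.comp]
  by_cases hp : P.any (fun kv => kv.1 == p.1 && kv.2.any (fun al => PySem.Str.isIn al h)) = true
  · rw [if_pos hp]
  · rw [if_neg hp]

theorem mapColsScan_items :
    ∀ (l : List (Int × String)) (P : List (String × List String))
      (d : PySem.Dict String (Option Int)),
    (P.map Prod.fst).Nodup →
    (∀ kv ∈ P, d.contains kv.1 = true) →
    (mapColsScan l P d).items = d.items.map (pendingVal P l) := by
  intro l
  induction l with
  | nil =>
      intro P d _ _
      have : mapColsScan [] P d = d := by cases P <;> rfl
      rw [this]
      have hid : ∀ p, pendingVal P [] p = p := by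
        intro p
        unfold pendingVal
        cases P.find? (fun kv => kv.1 == p.1) with
        | none => rfl
        | some kv => simp [firstHit]
      rw [List.map_congr_left (fun p _ => hid p), List.map_id']
  | cons ih_p rest ih =>
      intro P d hnd hc
      obtain ⟨i, h⟩ := ih_p
      cases P with
      | nil =>
          simp only [mapColsScan]
          have hid : ∀ p, pendingVal [] ((i, h) :: rest) p = p := by
            intro p; unfold pendingVal; simp
          rw [List.map_congr_left (fun p _ => hid p), List.map_id']
      | cons kv0 P' =>
          show (mapColsScan rest (mapColsStep i h (kv0 :: P') d).2 (mapColsStep i h (kv0 :: P') d).1).items = _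
          set P := kv0 :: P' with hP
          set Q := P.filter (fun kv => !(kv.2.any (fun al => PySem.Str.isIn al h))) with hQ
          have hsnd : (mapColsStep i h P d).2 = Q := by
            unfold mapColsStep; rw [mapColsStep_snd, List.nil_append]
          have hfst : (mapColsStep i h P d).1.items =
              d.items.map (fun p =>
                if P.any (fun kv => kv.1 == p.1 && kv.2.any (fun al => PySem.Str.isIn al h))
                then (p.1, some i) else p) := by
            unfold mapColsStep; exact mapColsStep_fst i h P d [] hc
          have hndQ : (Q.map Prod.fst).Nodup := by
            rw [hQ]
            exact hnd.sublist (List.Sublist.map Prod.fst (List.filter_sublist (l := P)))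
          have hcQ : ∀ kv ∈ Q, (mapColsStep i h P d).1.contains kv.1 = true := by
            intro kv hkv
            have hkeys := keys_mapColsStep i h P d hc
            have : kv.1 ∈ d.keys := by
              have hm : kv ∈ P := List.mem_of_mem_filter hkv
              have := hc kv hm
              exact (PySem.Dict.contains_iff_mem_keys _ _).mp this
            exact (PySem.Dict.contains_iff_mem_keys _ _).mpr (hkeys ▸ this)
          rw [hsnd, ih Q _ hndQ hcQ, hfst, List.map_map]
          apply List.map_congr_left
          intro p _
          simp only [Function.comp]
          -- compare pointwise
          cases hfind : P.find? (fun kv => kv.1 == p.1) with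
          | none =>
              have hnone : ∀ kv ∈ P, ¬ (kv.1 == p.1) = true := by
                intro kv hkv
                exact by
                  have := List.find?_eq_none.mp hfind kv hkv
                  simpa using this
              have hany : P.any (fun kv => kv.1 == p.1 && kv.2.any (fun al => PySem.Str.isIn al h)) = false := by
                rw [List.any_eq_false]
                intro kv hkv
                simp only [Bool.and_eq_true, not_and]
                intro hk
                exact absurd hk (hnone kv hkv)
              have hfindQ : Q.find? (fun kv => kv.1 == p.1) = none := by
                rw [List.find?_eq_none]
                intro kv hkv
                have := hnone kv (List.mem_of_mem_filter hkv)
                simpa using this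
              simp only [hany, Bool.false_eq_true, if_false]
              unfold pendingVal
              rw [hfind, hfindQ]
          | some kv =>
              have hkmem : kv ∈ P := List.mem_of_find?_eq_some hfind
              have hkeq : kv.1 = p.1 := by
                have := List.find?_some hfind
                simpa using this
              by_cases hmatch : kv.2.any (fun al => PySem.Str.isIn al h) = true
              · have hany : P.any (fun q => q.1 == p.1 && q.2.any (fun al => PySem.Str.isIn al h)) = true := by
                  rw [List.any_eq_true]
                  exact ⟨kv, hkmem, by rw [show (kv.1 == p.1) = true from by simp [hkeq], hmatch]; rfl⟩
                have hfindQ : Q.find? (fun q => q.1 == p.1) = none := by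
                  rw [List.find?_eq_none]
                  intro q hq
                  have hqP : q ∈ P := List.mem_of_mem_filter hq
                  have hqnm : ¬ q.2.any (fun al => PySem.Str.isIn al h) = true := by
                    have := List.of_mem_filter hq
                    simpa using this
                  intro hqk
                  have hq1 : q.1 = p.1 := by simpa using hqk
                  -- nodup keys: q = kv, contradiction with hmatch
                  have : q = kv := by
                    have h1 := find?_key_of_nodup P q hnd hqP
                    have h2 := find?_key_of_nodup P kv hnd hkmem
                    rw [hq1] at h1
                    rw [hkeq] at h2
                    have := h1.symm.trans h2
                    exact (Option.some.injEq _ _ ▸ this)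
                  exact hqnm (this ▸ hmatch)
                simp only [hany, if_true]
                unfold pendingVal
                rw [hfind, hfindQ]
                simp only [firstHit]
                rw [if_pos hmatch]
              · have hany : P.any (fun q => q.1 == p.1 && q.2.any (fun al => PySem.Str.isIn al h)) = false := by
                  rw [List.any_eq_false]
                  intro q hq
                  by_cases hqk : (q.1 == p.1) = true
                  · have hq1 : q.1 = p.1 := by simpa using hqk
                    have hqv : q = kv := by
                      have h1 := find?_key_of_nodup P q hnd hq
                      have h2 := find?_key_of_nodup P kv hnd hkmem
                      rw [hq1] at h1; rw [hkeq] at h2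
                      have := h1.symm.trans h2
                      exact (Option.some.injEq _ _ ▸ this)
                    rw [Bool.not_eq_true] at hmatch
                    rw [hqv, hmatch, Bool.and_false]
                    simp
                  · rw [Bool.not_eq_true] at hqk
                    rw [hqk, Bool.false_and]
                    simp
                have hkQ : kv ∈ Q := by
                  rw [hQ]
                  exact List.mem_filter.mpr ⟨hkmem, by simpa using hmatch⟩
                have hfindQ : Q.find? (fun q => q.1 == p.1) = some kv := by
                  have := find?_key_of_nodup Q kv hndQ hkQ
                  rw [hkeq] at this; exact this
                simp only [hany, Bool.false_eq_true, if_false]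
                unfold pendingVal
                rw [hfind, hfindQ]
                simp only [firstHit]
                rw [if_neg hmatch]

-- ===== VERDICT (by name: the statement is the Claim_ definition above) =====
theorem map_cols_py_spec : Claim_equal_map_cols_py := by
  intro headers mapping _ hpre
  unfold Spec_map_cols_py
  unfold Pre_map_cols_py at hpre
  rw [map_cols_py_items headers mapping hpre]
  unfold map_cols_py_alt
  have h0 : (mapping.foldl
      (fun (d : PySem.Dict String (Option Int)) kv => d.insert kv.1 none) PySem.Dict.empty).items =
      mapping.map (fun kv => (kv.1, (none : Option Int))) := by
    rw [PySem.Dict.items_foldl_insert_fresh]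
    · rw [show (PySem.Dict.empty : PySem.Dict String (Option Int)).items = [] from rfl, List.nil_append]
    · intro a _; simp
    · simpa using hpre
  have hc0 : ∀ kv ∈ mapping, (mapping.foldl
      (fun (d : PySem.Dict String (Option Int)) kv => d.insert kv.1 none) PySem.Dict.empty).contains kv.1 = true := by
    intro kv hkv
    rw [PySem.Dict.contains_iff_mem_keys]
    show kv.1 ∈ (PySem.Dict.items _).map Prod.fst
    rw [h0, List.map_map]
    exact List.mem_map.mpr ⟨kv, hkv, rfl⟩
  rw [mapColsScan_items (PySem.List.enumerate headers 0) mapping _ hpre hc0, h0, List.map_map]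
  apply List.map_congr_left
  intro kv hkv
  simp only [Function.comp]
  unfold pendingVal
  rw [show (mapping.find? (fun q => q.1 == (kv.1, (none : Option Int)).1)) = some kv from
    find?_key_of_nodup mapping kv hpre hkv]
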